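-- pv_equiv track=rewrite | github.com/IanRexDolaogon/Automata_LabActivities | lab1_act_1.py | num1
-- ===== SOURCE A (Python) =====
-- def num1(string):
--     state = "a"
--     for ch in string:
--         match state:
--             case "a":
--                 match ch:
--                     case "0": state = "a"
--                     case "1": state ="b"
--             case "b":
--                 match ch:
--                     case "0": state = "final"
--                     case "1": state ="b"
--             case "c":
--                 match ch:
--                     case "0": state = "b"
--                     case "1": state = "final"
--     return state =="final"
-- ===== SOURCE B (Python) =====
-- def num1(string):
--     i = string.find('1')
--     return i != -1 and '0' in string[i+1:]
-- ===== Notes on version B (the rewrite author's own statement) =====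
-- stated objective: simpler
-- what changed: Replaces the per-character DFA state-machine loop with a closed form over string search: accept iff a '0' occurs after the first '1' (find + substring membership).
import Mathlib
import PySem

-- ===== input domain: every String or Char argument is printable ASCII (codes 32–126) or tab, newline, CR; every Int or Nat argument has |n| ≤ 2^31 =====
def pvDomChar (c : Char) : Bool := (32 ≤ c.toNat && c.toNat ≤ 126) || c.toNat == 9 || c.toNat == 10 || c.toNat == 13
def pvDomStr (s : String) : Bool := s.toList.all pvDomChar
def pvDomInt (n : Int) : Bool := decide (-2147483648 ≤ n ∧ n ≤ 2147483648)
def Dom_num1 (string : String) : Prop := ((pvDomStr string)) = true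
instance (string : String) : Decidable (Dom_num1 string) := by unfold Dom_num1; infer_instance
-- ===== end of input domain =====

-- B replaces A's per-character DFA state loop by a closed form over string search:
-- the DFA accepts iff a '0' occurs after the first '1' — objective: simpler.

-- ===== PORT A =====
-- one step of A's match statement: an unmatched state or char leaves state unchanged
def num1Step (state : String) (ch : Char) : String :=
  if state = "a" then (if ch = '0' then "a" else if ch = '1' then "b" else state)
  else if state = "b" then (if ch = '0' then "final" else if ch = '1' then "b" else state)
  else if state = "c" then (if ch = '0' then "b" else if ch = '1' then "final" else state)
  else state

def num1 (string : String) : Bool :=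
  (string.toList.foldl num1Step "a") == "final"

-- ===== PORT B =====
def num1_alt (string : String) : Bool :=
  let i := PySem.Str.find string "1"
  i != -1 && PySem.Str.isIn "0" (PySem.Str.slice string (some (i + 1)) none)

-- ===== PRECONDITION & SPEC =====
def Spec_num1 (string : String) (out : Bool) : Prop := out = num1_alt string
instance (string : String) (out : Bool) : Decidable (Spec_num1 string out) := by unfold Spec_num1; infer_instance

-- ===== CLAIM (what is proved, stated in full; the proofs are below) =====
def Claim_equal_num1 : Prop := ∀ (string : String), Dom_num1 string → Spec_num1 string (num1 string)

-- ===== LEMMAS AND PROOFS =====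

-- the characterisation both programs compute: some '1' has a '0' somewhere after it
def hasOneThenZero (l : List Char) : Prop := ∃ p s, l = p ++ '1' :: s ∧ '0' ∈ s

-- "final" is absorbing in A's machine
theorem foldA_final (l : List Char) : l.foldl num1Step "final" = "final" := by
  induction l with
  | nil => rfl
  | cons c l ih => simpa [num1Step] using ih

theorem foldA_b (l : List Char) :
    l.foldl num1Step "b" = "final" ↔ '0' ∈ l := by
  induction l with
  | nil => simp
  | cons c l ih =>
    by_cases h0 : c = '0'
    · subst h0
      simp [List.foldl_cons, num1Step, foldA_final]
    · have h0' : ¬('0' = c) := fun h => h0 h.symm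
      by_cases h1 : c = '1' <;>
        simp [List.foldl_cons, num1Step, h0, h0', h1, ih]

theorem foldA_a (l : List Char) :
    l.foldl num1Step "a" = "final" ↔ hasOneThenZero l := by
  induction l with
  | nil =>
    simp only [List.foldl_nil, hasOneThenZero]
    constructor
    · intro h; exact absurd h (by decide)
    · rintro ⟨p, s, h, -⟩; exact absurd h (by simp)
  | cons c l ih =>
    by_cases h1 : c = '1'
    · subst h1
      rw [List.foldl_cons]
      have : num1Step "a" '1' = "b" := by decide
      rw [this, foldA_b]
      constructor
      · intro h0; exact ⟨[], l, rfl, h0⟩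
      · rintro ⟨p, s, h, h0⟩
        rcases p with _ | ⟨d, p⟩
        · simp only [List.nil_append, List.cons.injEq, true_and] at h
          rw [h]; exact h0
        · simp only [List.cons_append, List.cons.injEq] at h
          rw [h.2]
          exact List.mem_append.2 (Or.inr (List.mem_cons.2 (Or.inr h0)))
    · have hstep : num1Step "a" c = "a" := by
        by_cases h0 : c = '0' <;> simp [num1Step, h0, h1]
      rw [List.foldl_cons, hstep, ih]
      constructor
      · rintro ⟨p, s, h, h0⟩; exact ⟨c :: p, s, by rw [h, List.cons_append], h0⟩
      · rintro ⟨p, s, h, h0⟩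
        rcases p with _ | ⟨d, p⟩
        · simp only [List.nil_append, List.cons.injEq] at h
          exact absurd h.1 h1
        · simp only [List.cons_append, List.cons.injEq] at h
          exact ⟨p, s, h.2, h0⟩

theorem alt_iff (string : String) :
    num1_alt string = true ↔ hasOneThenZero string.toList := by
  unfold num1_alt
  set l := string.toList with hl
  constructor
  · intro h
    simp only [Bool.and_eq_true, bne_iff_ne, ne_eq] at h
    obtain ⟨hne, hin⟩ := h
    have hge : 0 ≤ PySem.Str.find string "1" := by
      have hlb := PySem.Chars.neg_one_le_find string.toList "1".toList
      rw [PySem.Str.find_eq] at hne ⊢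
      omega
    rw [PySem.Str.find_eq] at hge
    obtain ⟨hpre, -⟩ := PySem.Chars.find_spec hge
    set i := (PySem.Chars.find string.toList "1".toList).toNat with hi
    -- the slice string[i+1:]
    have hslice : (PySem.Str.slice string (some (PySem.Str.find string "1" + 1)) none).toList
        = l.drop (i + 1) := by
      rw [PySem.Str.toList_slice, PySem.Chars.slice_eq_listSlice,
        PySem.List.slice_from _ (by rw [PySem.Str.find_eq]; omega)]
      congr 1
      rw [PySem.Str.find_eq]
      omega
    rw [PySem.Str.isIn_eq, hslice, PySem.Chars.isIn_iff_infix] at hin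
    have h0 : '0' ∈ l.drop (i + 1) := by
      have : "0".toList = ['0'] := rfl
      rw [this] at hin
      obtain ⟨p, s, hps⟩ := hin
      rw [← hps]; simp
    -- drop i l starts with '1'
    have h1 : l.drop i = '1' :: l.drop (i + 1) := by
      have : "1".toList = ['1'] := rfl
      rw [this] at hpre
      obtain ⟨t, ht⟩ := hpre
      have hlen : i < l.length := by
        by_contra hge'
        push Not at hge'
        rw [List.drop_eq_nil_of_le hge'] at ht
        simp at ht
      rw [← List.getElem_cons_drop hlen] at ht ⊢
      simp only [List.cons_append, List.cons.injEq] at ht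
      rw [ht.1]
    exact ⟨l.take i, l.drop (i + 1), by rw [← h1, List.take_append_drop], h0⟩
  · rintro ⟨p, s, h, h0⟩
    have hinf : "1".toList <:+: l := ⟨p, s, by simp [h]⟩
    have hge : 0 ≤ PySem.Str.find string "1" := by
      rw [PySem.Str.find_nonneg_iff]; exact hinf
    have hne : PySem.Str.find string "1" ≠ -1 := by omega
    simp only [Bool.and_eq_true, bne_iff_ne, ne_eq]
    refine ⟨hne, ?_⟩
    rw [PySem.Str.find_eq] at hge
    obtain ⟨-, hmin⟩ := PySem.Chars.find_spec hge
    set i := (PySem.Chars.find string.toList "1".toList).toNat with hi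
    have hile : i ≤ p.length := by
      by_contra hgt
      push Not at hgt
      exact hmin p.length hgt ⟨s, by rw [← hl, h]; simp⟩
    have hslice : (PySem.Str.slice string (some (PySem.Str.find string "1" + 1)) none).toList
        = l.drop (i + 1) := by
      rw [PySem.Str.toList_slice, PySem.Chars.slice_eq_listSlice,
        PySem.List.slice_from _ (by rw [PySem.Str.find_eq]; omega)]
      congr 1
      rw [PySem.Str.find_eq]
      omega
    rw [PySem.Str.isIn_eq, hslice, PySem.Chars.isIn_iff_infix]
    have hs : l.drop (p.length + 1) = s := by
      rw [h, show p ++ '1' :: s = (p ++ ['1']) ++ s from by simp,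
        show p.length + 1 = (p ++ ['1']).length from by simp]
      exact List.drop_left
    have h0' : '0' ∈ l.drop (i + 1) := by
      have : l.drop (p.length + 1) = (l.drop (i + 1)).drop (p.length - i) := by
        rw [List.drop_drop]; congr 1; omega
      exact List.mem_of_mem_drop (by rw [← this, hs]; exact h0)
    obtain ⟨p', q', hsplit⟩ := List.mem_iff_append.1 h0'
    exact ⟨p', q', by simp [hsplit]⟩

-- ===== VERDICT (by name: the statement is the Claim_ definition above) =====
theorem num1_spec : Claim_equal_num1 := by
  intro string _
  unfold Spec_num1 num1
  rcases hB : num1_alt string with _ | _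
  · rw [beq_eq_false_iff_ne]
    intro hA
    rw [← Bool.not_eq_true, alt_iff] at hB
    exact hB ((foldA_a string.toList).1 hA)
  · rw [beq_iff_eq]
    exact (foldA_a string.toList).2 ((alt_iff string).1 hB)
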